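-- pv_equiv track=rewrite | github.com/janwillemvl/advent_of_code_2021 | day_9/solve_9.py | add_basin_members
-- ===== SOURCE A (Python) =====
-- def get_cell_id(x, y, max_cols):
--     return y*max_cols + x
--
-- def add_basin_members(height_map, x, y, max_cols, basin):
--     if y in height_map.keys() and x in height_map[y].keys() and height_map[y][x] < 9:
--         id = get_cell_id(x, y, max_cols)
--         if id not in basin:
--             basin.add(id)
--             for i in range(-1, 2, 1):
--                 for j in range(-1, 2, 1):
--                     if i == 0 or j == 0:
--                         add_basin_members(height_map, x + i, y + j, max_cols, basin)
--
--     return basin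
-- ===== SOURCE B (Python) =====
-- def get_cell_id(x, y, max_cols):
--     return y*max_cols + x
--
-- def add_basin_members(height_map, x, y, max_cols, basin):
--     # Iterative flood fill with an explicit stack instead of recursion.
--     # Mutates and returns the same basin set, like the original.
--     stack = [(x, y)]
--     while stack:
--         cx, cy = stack.pop()
--         if cy in height_map and cx in height_map[cy] and height_map[cy][cx] < 9:
--             cid = get_cell_id(cx, cy, max_cols)
--             if cid not in basin:
--                 basin.add(cid)
--                 stack.extend(((cx + 1, cy), (cx, cy + 1), (cx, cy - 1), (cx - 1, cy)))
--     return basin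
-- ===== Notes on version B (the rewrite author's own statement) =====
-- stated objective: alternative
-- what changed: the recursive flood fill is replaced by an iterative one: an explicit stack of pending coordinates is popped in a single while-loop, the same bounds/height/seen guards are applied, and the four orthogonal neighbours are pushed; no self-call and no Python recursion depth is used
import Mathlib
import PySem

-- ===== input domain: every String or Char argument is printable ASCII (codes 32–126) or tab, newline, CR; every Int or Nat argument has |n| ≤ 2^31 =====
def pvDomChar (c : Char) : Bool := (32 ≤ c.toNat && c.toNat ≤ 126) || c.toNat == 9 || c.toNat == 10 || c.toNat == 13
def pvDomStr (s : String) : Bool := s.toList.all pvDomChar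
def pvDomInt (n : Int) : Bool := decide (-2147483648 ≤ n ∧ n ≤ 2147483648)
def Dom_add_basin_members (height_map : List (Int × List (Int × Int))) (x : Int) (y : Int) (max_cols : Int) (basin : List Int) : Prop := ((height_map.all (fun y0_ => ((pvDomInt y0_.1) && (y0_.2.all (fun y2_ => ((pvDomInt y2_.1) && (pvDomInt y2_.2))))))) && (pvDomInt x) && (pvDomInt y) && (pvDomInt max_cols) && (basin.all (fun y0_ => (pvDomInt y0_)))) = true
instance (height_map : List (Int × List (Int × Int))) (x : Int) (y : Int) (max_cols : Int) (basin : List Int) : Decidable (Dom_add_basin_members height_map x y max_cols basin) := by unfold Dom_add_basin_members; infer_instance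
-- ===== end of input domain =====

-- B replaces A's recursion by an iterative explicit-stack flood fill (same guards, four
-- orthogonal neighbours pushed, no self-call); equivalence is about the returned set —
-- both Pythons mutate the passed-in `basin` in place identically and return it.

-- Shared helper: dict lookup (first match), the meaning of `d[k]` / `k in d.keys()`.
def pvGet? {α : Type} (d : List (Int × α)) (k : Int) : Option α :=
  match d with
  | [] => none
  | (k', v) :: rest => if k' == k then some v else pvGet? rest k

-- Shared termination measure: ids of in-bounds cells of height < 9 not yet in the basin.
def pvIds (height_map : List (Int × List (Int × Int))) (max_cols : Int) : List Int :=
  height_map.flatMap (fun p => p.2.filterMap (fun q => if q.2 < 9 then some (p.1 * max_cols + q.1) else none))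

def pvMissing (height_map : List (Int × List (Int × Int))) (max_cols : Int) (basin : List Int) : Nat :=
  ((pvIds height_map max_cols).toFinset \ basin.toFinset).card

lemma pvGet?_mem {α : Type} {d : List (Int × α)} {k : Int} {v : α} (h : pvGet? d k = some v) : (k, v) ∈ d := by
  induction d with
  | nil => simp [pvGet?] at h
  | cons p rest ih =>
    obtain ⟨k', v'⟩ := p
    simp only [pvGet?] at h
    split at h
    · rename_i hk
      cases h
      simp only [beq_iff_eq] at hk
      subst hk
      exact List.mem_cons_self
    · exact List.mem_cons_of_mem _ (ih h)

lemma pv_id_mem_ids {height_map : List (Int × List (Int × Int))} {max_cols x y : Int}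
    {row : List (Int × Int)} {h : Int}
    (hy : pvGet? height_map y = some row) (hx : pvGet? row x = some h) (h9 : h < 9) :
    y * max_cols + x ∈ pvIds height_map max_cols := by
  have hyr := pvGet?_mem hy
  have hxr := pvGet?_mem hx
  simp only [pvIds, List.mem_flatMap]
  exact ⟨(y, row), hyr, by simp only [List.mem_filterMap]; exact ⟨(x, h), hxr, by simp [h9]⟩⟩

lemma pvMissing_add_lt {height_map : List (Int × List (Int × Int))} {max_cols x y : Int}
    {row : List (Int × Int)} {h : Int} {basin : List Int}
    (hy : pvGet? height_map y = some row) (hx : pvGet? row x = some h) (h9 : h < 9)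
    (hnb : y * max_cols + x ∉ basin) :
    pvMissing height_map max_cols (basin ++ [y * max_cols + x]) < pvMissing height_map max_cols basin := by
  unfold pvMissing
  have hid := pv_id_mem_ids (max_cols := max_cols) hy hx h9
  have h1 : (basin ++ [y * max_cols + x]).toFinset = insert (y * max_cols + x) basin.toFinset := by
    simp [List.toFinset_append]
  rw [h1, Finset.sdiff_insert]
  exact Finset.card_erase_lt_of_mem (by simp [Finset.mem_sdiff, hid, hnb])

-- ===== PORT A =====
-- Python helper get_cell_id
def get_cell_id (x y max_cols : Int) : Int := y * max_cols + x

-- Literal port of the recursive A. The recursion terminates because every recursive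
-- level that passes the guards adds a fresh id to `basin`; the wrapper therefore runs
-- it with fuel pvMissing+1, which lemma aGo_stable below shows is always sufficient,
-- so this computes exactly Python A's recursion. The guard `y in hm.keys() and
-- x in hm[y].keys() and hm[y][x] < 9` is ported as matches on the first-match lookup
-- pvGet? (contains = lookup succeeds); `basin.add` is PySem.Set.add; the two
-- `range(-1, 2, 1)` loops are folds over PySem.List.pyRange.
def aGo : Nat → List (Int × List (Int × Int)) → Int → Int → Int → List Int → List Int
  | 0, _, _, _, _, basin => basin
  | fuel+1, height_map, x, y, max_cols, basin =>
    match pvGet? height_map y with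
    | none => basin
    | some row =>
      match pvGet? row x with
      | none => basin
      | some h =>
        if h < 9 then
          let id := get_cell_id x y max_cols
          if id ∈ basin then basin
          else
            let b0 := PySem.Set.add basin id
            (PySem.List.pyRange (-1) 2 1).foldl (fun b i =>
              (PySem.List.pyRange (-1) 2 1).foldl (fun b j =>
                if i == 0 || j == 0 then aGo fuel height_map (x + i) (y + j) max_cols b else b) b) b0
        else basin

def add_basin_members (height_map : List (Int × List (Int × Int))) (x : Int) (y : Int) (max_cols : Int) (basin : List Int) : List Int :=
  aGo (pvMissing height_map max_cols basin + 1) height_map x y max_cols basin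

-- ===== PORT B =====
-- Literal port of B's while-loop: the stack is a list whose head is the top (Python's
-- append-at-end/pop-at-end), so `extend(((cx+1,cy),(cx,cy+1),(cx,cy-1),(cx-1,cy)))`
-- becomes consing those coordinates in reverse push order.
def bGo (height_map : List (Int × List (Int × Int))) (max_cols : Int) : List Int → List (Int × Int) → List Int
  | basin, [] => basin
  | basin, (cx, cy) :: rest =>
    match hy : pvGet? height_map cy with
    | none => bGo height_map max_cols basin rest
    | some row =>
      match hx : pvGet? row cx with
      | none => bGo height_map max_cols basin rest
      | some h =>
        if h9 : h < 9 then
          let cid := get_cell_id cx cy max_cols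
          if hb : cid ∈ basin then bGo height_map max_cols basin rest
          else bGo height_map max_cols (PySem.Set.add basin cid)
                 ((cx - 1, cy) :: (cx, cy - 1) :: (cx, cy + 1) :: (cx + 1, cy) :: rest)
        else bGo height_map max_cols basin rest
termination_by basin s => (pvMissing height_map max_cols basin, s.length)
decreasing_by
  · exact Prod.Lex.right _ (by simp)
  · exact Prod.Lex.right _ (by simp)
  · exact Prod.Lex.right _ (by simp)
  · apply Prod.Lex.left
    have : PySem.Set.add basin (get_cell_id cx cy max_cols) = basin ++ [cy * max_cols + cx] := by
      rw [PySem.Set.add_of_not_mem hb]; rfl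
    rw [this]
    exact pvMissing_add_lt hy hx h9 hb
  · exact Prod.Lex.right _ (by simp)

def add_basin_members_alt (height_map : List (Int × List (Int × Int))) (x : Int) (y : Int) (max_cols : Int) (basin : List Int) : List Int :=
  bGo height_map max_cols basin [(x, y)]

-- ===== PRECONDITION & SPEC =====
def Spec_add_basin_members (height_map : List (Int × List (Int × Int))) (x : Int) (y : Int) (max_cols : Int) (basin : List Int) (out : List Int) : Prop := out = add_basin_members_alt height_map x y max_cols basin
instance (height_map : List (Int × List (Int × Int))) (x : Int) (y : Int) (max_cols : Int) (basin : List Int) (out : List Int) : Decidable (Spec_add_basin_members height_map x y max_cols basin out) := by unfold Spec_add_basin_members; infer_instance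

-- ===== CLAIM (what is proved, stated in full; the proofs are below) =====
def Claim_equal_add_basin_members : Prop := ∀ (height_map : List (Int × List (Int × Int))) (x : Int) (y : Int) (max_cols : Int) (basin : List Int), Dom_add_basin_members height_map x y max_cols basin → Spec_add_basin_members height_map x y max_cols basin (add_basin_members height_map x y max_cols basin)

-- ===== LEMMAS AND PROOFS =====

lemma pvMissing_mono {height_map : List (Int × List (Int × Int))} {max_cols : Int}
    (b e : List Int) :
    pvMissing height_map max_cols (b ++ e) ≤ pvMissing height_map max_cols b := by
  unfold pvMissing
  apply Finset.card_le_card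
  intro a ha
  simp only [Finset.mem_sdiff, List.mem_toFinset, List.mem_append] at *
  exact ⟨ha.1, fun hc => ha.2 (Or.inl hc)⟩

-- the two range(-1,2,1) folds of aGo, unfolded to the five guarded calls
lemma pyRange_m1_2 : PySem.List.pyRange (-1) 2 1 = [-1, 0, 1] := by decide

lemma aGo_succ (fuel : Nat) (height_map : List (Int × List (Int × Int))) (x y max_cols : Int) (basin : List Int) :
    aGo (fuel+1) height_map x y max_cols basin =
    match pvGet? height_map y with
    | none => basin
    | some row =>
      match pvGet? row x with
      | none => basin
      | some h =>
        if h < 9 then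
          if y * max_cols + x ∈ basin then basin
          else
            let b0 := basin ++ [y * max_cols + x]
            let c1 := aGo fuel height_map (x - 1) y max_cols b0
            let c2 := aGo fuel height_map x (y - 1) max_cols c1
            let c3 := aGo fuel height_map x y max_cols c2
            let c4 := aGo fuel height_map x (y + 1) max_cols c3
            aGo fuel height_map (x + 1) y max_cols c4
        else basin := by
  simp only [aGo, get_cell_id]
  cases hy : pvGet? height_map y with
  | none => rfl
  | some row =>
    dsimp only
    cases hx : pvGet? row x with
    | none => rfl
    | some h =>
      by_cases h9 : h < 9
      · simp only [if_pos h9]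
        by_cases hb : y * max_cols + x ∈ basin
        · simp [hb]
        · simp only [if_neg hb]
          rw [PySem.Set.add_of_not_mem hb, pyRange_m1_2]
          simp only [List.foldl]
          norm_num
          simp only [← sub_eq_add_neg]
      · simp [h9]

-- a call on a cell whose id is already in the basin is a no-op
lemma aGo_mem_noop (fuel : Nat) (hm : List (Int × List (Int × Int))) (x y mc : Int) (b : List Int)
    (hf : 0 < fuel) (hmem : y * mc + x ∈ b) : aGo fuel hm x y mc b = b := by
  obtain ⟨g, rfl⟩ : ∃ g, fuel = g + 1 := ⟨fuel - 1, by omega⟩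
  rw [aGo_succ]
  cases pvGet? hm y with
  | none => rfl
  | some row =>
    dsimp only
    cases pvGet? row x with
    | none => rfl
    | some h =>
      by_cases h9 : h < 9
      · simp [h9, hmem]
      · simp [h9]

-- aGo only appends to the basin
lemma aGo_extends : ∀ (fuel : Nat) (hm : List (Int × List (Int × Int))) (mc x y : Int) (b : List Int),
    ∃ e, aGo fuel hm x y mc b = b ++ e := by
  intro fuel
  induction fuel with
  | zero => intro hm mc x y b; exact ⟨[], by simp [aGo]⟩
  | succ f ih =>
    intro hm mc x y b
    rw [aGo_succ]
    cases pvGet? hm y with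
    | none => exact ⟨[], by simp⟩
    | some row =>
      dsimp only
      cases pvGet? row x with
      | none => exact ⟨[], by simp⟩
      | some h =>
        by_cases h9 : h < 9
        · simp only [if_pos h9]
          by_cases hb : y * mc + x ∈ b
          · simp only [if_pos hb]; exact ⟨[], by simp⟩
          · simp only [if_neg hb]
            obtain ⟨e1, h1⟩ := ih hm mc (x-1) y (b ++ [y*mc+x])
            rw [h1]
            obtain ⟨e2, h2⟩ := ih hm mc x (y-1) (b ++ [y*mc+x] ++ e1)
            rw [h2]
            obtain ⟨e3, h3⟩ := ih hm mc x y (b ++ [y*mc+x] ++ e1 ++ e2)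
            rw [h3]
            obtain ⟨e4, h4⟩ := ih hm mc x (y+1) (b ++ [y*mc+x] ++ e1 ++ e2 ++ e3)
            rw [h4]
            obtain ⟨e5, h5⟩ := ih hm mc (x+1) y (b ++ [y*mc+x] ++ e1 ++ e2 ++ e3 ++ e4)
            rw [h5]
            exact ⟨[y*mc+x] ++ e1 ++ e2 ++ e3 ++ e4 ++ e5, by simp [List.append_assoc]⟩
        · exact ⟨[], by simp [h9]⟩

-- with fuel above pvMissing the result no longer depends on the fuel
lemma aGo_stable : ∀ (n f f' : Nat) (hm : List (Int × List (Int × Int))) (mc x y : Int) (b : List Int),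
    pvMissing hm mc b ≤ n → n < f → n < f' → aGo f hm x y mc b = aGo f' hm x y mc b := by
  intro n
  induction n with
  | zero =>
    intro f f' hm mc x y b hμ hf hf'
    obtain ⟨g, rfl⟩ : ∃ g, f = g + 1 := ⟨f - 1, by omega⟩
    obtain ⟨g', rfl⟩ : ∃ g', f' = g' + 1 := ⟨f' - 1, by omega⟩
    rw [aGo_succ, aGo_succ]
    cases hy : pvGet? hm y with
    | none => rfl
    | some row =>
      dsimp only
      cases hx : pvGet? row x with
      | none => rfl
      | some h =>
        by_cases h9 : h < 9
        · by_cases hb : y * mc + x ∈ b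
          · simp [h9, hb]
          · exfalso
            have := pvMissing_add_lt (max_cols := mc) hy hx h9 hb
            omega
        · simp [h9]
  | succ n ih =>
    intro f f' hm mc x y b hμ hf hf'
    obtain ⟨g, rfl⟩ : ∃ g, f = g + 1 := ⟨f - 1, by omega⟩
    obtain ⟨g', rfl⟩ : ∃ g', f' = g' + 1 := ⟨f' - 1, by omega⟩
    rw [aGo_succ, aGo_succ]
    cases hy : pvGet? hm y with
    | none => rfl
    | some row =>
      dsimp only
      cases hx : pvGet? row x with
      | none => rfl
      | some h =>
        by_cases h9 : h < 9
        · by_cases hb : y * mc + x ∈ b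
          · simp [h9, hb]
          · simp only [if_pos h9, if_neg hb]
            have hlt := pvMissing_add_lt (max_cols := mc) hy hx h9 hb
            have hμ1 : pvMissing hm mc (b ++ [y * mc + x]) ≤ n := by omega
            have e1 := ih g g' hm mc (x-1) y (b ++ [y*mc+x]) hμ1 (by omega) (by omega)
            rw [e1]
            obtain ⟨t1, ht1⟩ := aGo_extends g' hm mc (x-1) y (b ++ [y*mc+x])
            have hμ2 : pvMissing hm mc (aGo g' hm (x-1) y mc (b ++ [y*mc+x])) ≤ n := by
              rw [ht1]; exact le_trans (pvMissing_mono _ _) hμ1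
            rw [ih g g' hm mc x (y-1) _ hμ2 (by omega) (by omega)]
            obtain ⟨t2, ht2⟩ := aGo_extends g' hm mc x (y-1) (aGo g' hm (x-1) y mc (b ++ [y*mc+x]))
            have hμ3 : pvMissing hm mc (aGo g' hm x (y-1) mc (aGo g' hm (x-1) y mc (b ++ [y*mc+x]))) ≤ n := by
              rw [ht2]; exact le_trans (pvMissing_mono _ _) hμ2
            rw [ih g g' hm mc x y _ hμ3 (by omega) (by omega)]
            obtain ⟨t3, ht3⟩ := aGo_extends g' hm mc x y (aGo g' hm x (y-1) mc (aGo g' hm (x-1) y mc (b ++ [y*mc+x])))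
            have hμ4 : pvMissing hm mc (aGo g' hm x y mc (aGo g' hm x (y-1) mc (aGo g' hm (x-1) y mc (b ++ [y*mc+x])))) ≤ n := by
              rw [ht3]; exact le_trans (pvMissing_mono _ _) hμ3
            rw [ih g g' hm mc x (y+1) _ hμ4 (by omega) (by omega)]
            obtain ⟨t4, ht4⟩ := aGo_extends g' hm mc x (y+1) (aGo g' hm x y mc (aGo g' hm x (y-1) mc (aGo g' hm (x-1) y mc (b ++ [y*mc+x]))))
            have hμ5 : pvMissing hm mc (aGo g' hm x (y+1) mc (aGo g' hm x y mc (aGo g' hm x (y-1) mc (aGo g' hm (x-1) y mc (b ++ [y*mc+x]))))) ≤ n := by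
              rw [ht4]; exact le_trans (pvMissing_mono _ _) hμ4
            rw [ih g g' hm mc (x+1) y _ hμ5 (by omega) (by omega)]
        · simp [h9]

-- fuel above pvMissing computes add_basin_members itself
lemma aGo_eq_A (f : Nat) (hm : List (Int × List (Int × Int))) (mc x y : Int) (b : List Int)
    (hf : pvMissing hm mc b < f) : aGo f hm x y mc b = add_basin_members hm x y mc b := by
  simp only [add_basin_members]
  exact aGo_stable (pvMissing hm mc b) f _ hm mc x y b le_rfl hf (Nat.lt_succ_self _)

lemma A_extends (hm : List (Int × List (Int × Int))) (mc x y : Int) (b : List Int) :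
    ∃ e, add_basin_members hm x y mc b = b ++ e := by
  simp only [add_basin_members]
  exact aGo_extends _ hm mc x y b

-- one step of A, with the (always no-op) self-call removed and the recursive calls
-- expressed through add_basin_members itself
lemma A_eq_step (hm : List (Int × List (Int × Int))) (x y mc : Int) (b : List Int) :
    add_basin_members hm x y mc b =
    match pvGet? hm y with
    | none => b
    | some row =>
      match pvGet? row x with
      | none => b
      | some h =>
        if h < 9 then
          if y * mc + x ∈ b then b
          else
            add_basin_members hm (x+1) y mc (add_basin_members hm x (y+1) mc
              (add_basin_members hm x (y-1) mc (add_basin_members hm (x-1) y mc (b ++ [y*mc+x]))))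
        else b := by
  conv_lhs => rw [show add_basin_members hm x y mc b = aGo (pvMissing hm mc b + 1) hm x y mc b from rfl]
  rw [aGo_succ]
  cases hy : pvGet? hm y with
  | none => rfl
  | some row =>
    dsimp only
    cases hx : pvGet? row x with
    | none => rfl
    | some h =>
      by_cases h9 : h < 9
      · by_cases hb : y * mc + x ∈ b
        · simp [h9, hb]
        · simp only [if_pos h9, if_neg hb]
          have hlt := pvMissing_add_lt (max_cols := mc) hy hx h9 hb
          rw [aGo_eq_A (pvMissing hm mc b) hm mc (x-1) y (b ++ [y*mc+x]) hlt]
          obtain ⟨t1, ht1⟩ := A_extends hm mc (x-1) y (b ++ [y*mc+x])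
          have hμ2 : pvMissing hm mc (add_basin_members hm (x-1) y mc (b ++ [y*mc+x])) < pvMissing hm mc b := by
            rw [ht1]; exact lt_of_le_of_lt (pvMissing_mono _ _) hlt
          rw [aGo_eq_A (pvMissing hm mc b) hm mc x (y-1) _ hμ2]
          obtain ⟨t2, ht2⟩ := A_extends hm mc x (y-1) (add_basin_members hm (x-1) y mc (b ++ [y*mc+x]))
          have hμ3 : pvMissing hm mc (add_basin_members hm x (y-1) mc (add_basin_members hm (x-1) y mc (b ++ [y*mc+x]))) < pvMissing hm mc b := by
            rw [ht2]; exact lt_of_le_of_lt (pvMissing_mono _ _) hμ2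
          -- the self-call: its id is already in the basin, so it is the identity
          have hmem : y * mc + x ∈ add_basin_members hm x (y-1) mc (add_basin_members hm (x-1) y mc (b ++ [y*mc+x])) := by
            rw [ht2, ht1]; simp
          rw [aGo_mem_noop (pvMissing hm mc b) hm x y mc _ (by omega) hmem]
          rw [aGo_eq_A (pvMissing hm mc b) hm mc x (y+1) _ hμ3]
          obtain ⟨t3, ht3⟩ := A_extends hm mc x (y+1)
            (add_basin_members hm x (y-1) mc (add_basin_members hm (x-1) y mc (b ++ [y*mc+x])))
          have hμ4 : pvMissing hm mc (add_basin_members hm x (y+1) mc (add_basin_members hm x (y-1) mc (add_basin_members hm (x-1) y mc (b ++ [y*mc+x])))) < pvMissing hm mc b := by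
            rw [ht3]; exact lt_of_le_of_lt (pvMissing_mono _ _) hμ3
          rw [aGo_eq_A (pvMissing hm mc b) hm mc (x+1) y _ hμ4]
      · simp [h9]

-- B's stack loop folds A over the pending stack
lemma bGo_eq_foldl (hm : List (Int × List (Int × Int))) (mc : Int) (basin : List Int) (s : List (Int × Int)) :
    bGo hm mc basin s = s.foldl (fun b p => add_basin_members hm p.1 p.2 mc b) basin := by
  fun_induction bGo hm mc basin s with
  | case1 b => simp
  | case2 b cx cy rest hy ih =>
    rw [ih, List.foldl_cons, A_eq_step]
    simp [hy]
  | case3 b cx cy rest row hy hx ih =>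
    rw [ih, List.foldl_cons, A_eq_step]
    simp [hy, hx]
  | case4 b cx cy rest row hy h hx h9 cid hb ih =>
    have hb' : cy * mc + cx ∈ b := hb
    rw [ih, List.foldl_cons, A_eq_step]
    simp [hy, hx, h9, hb']
  | case5 b cx cy rest row hy h hx h9 cid hb ih =>
    have hb' : cy * mc + cx ∉ b := hb
    have hadd : PySem.Set.add b cid = b ++ [cy * mc + cx] := PySem.Set.add_of_not_mem hb
    rw [ih, hadd]
    simp only [List.foldl_cons]
    rw [A_eq_step hm cx cy mc b]
    simp only [hy, hx, if_pos h9, if_neg hb']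
  | case6 b cx cy rest row hy h hx h9 ih =>
    rw [ih, List.foldl_cons, A_eq_step]
    simp [hy, hx, h9]

-- ===== VERDICT (by name: the statement is the Claim_ definition above) =====
theorem add_basin_members_spec : Claim_equal_add_basin_members := by
  intro hm x y mc b _
  unfold Spec_add_basin_members add_basin_members_alt
  rw [bGo_eq_foldl]
  simp
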